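-- pv_equiv track=rewrite | github.com/luherod/Solving_problems | list_utils.py | find_streak
-- ===== SOURCE A (Python) =====
-- def find_streak(list, needle, n):
--     """
--     Devuelve True cuando enccuentra una racha (si en list hay n o más needles seguidos)
--     False para todo lo demás
--     """
--     # Si n>=0
--     if n>=0:
--         # Inicializo el indice el contador y el indicador de racha
--         index=0
--         count=0
--         streak=False
--         # Mientras no haya encontrado n seguidos y la lista no se haya acabado...
--         while count<n and index<len(list):
--             # Si lo encuentro, activo el indicador de rachas y actualizo el contador
--             if list[index]==needle:
--                 count+=1
--                 streak=True
--             # Si no lo encuentro, desactivo el indicador de racha y pongo a 0 el contador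
--             else:
--                 count=0
--                 streak=False
--             # Avanzo al siguiente elemento
--             index+=1
--         # Devolvemos el resultado de comparar el contador con n SI Y SOLO SI estamos en racha
--         return count>=n and streak
--     else:
--         return False
-- ===== SOURCE B (Python) =====
-- def find_streak(list, needle, n):
--     """True iff list contains at least n consecutive occurrences of needle."""
--     if n <= 0:
--         return False
--     prefix = [0]
--     total = 0
--     for x in list:
--         total += (x == needle)
--         prefix.append(total)
--     return any(prefix[i + n] - prefix[i] == n for i in range(len(list) - n + 1))
-- ===== Notes on version B (the rewrite author's own statement) =====
-- stated objective: alternative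
-- what changed: Replaced A's running streak-counter/flag while-loop by a prefix-count pass plus a window test: build prefix counts of needle occurrences, then report whether any window of length n contains n needles.
import Mathlib
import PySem

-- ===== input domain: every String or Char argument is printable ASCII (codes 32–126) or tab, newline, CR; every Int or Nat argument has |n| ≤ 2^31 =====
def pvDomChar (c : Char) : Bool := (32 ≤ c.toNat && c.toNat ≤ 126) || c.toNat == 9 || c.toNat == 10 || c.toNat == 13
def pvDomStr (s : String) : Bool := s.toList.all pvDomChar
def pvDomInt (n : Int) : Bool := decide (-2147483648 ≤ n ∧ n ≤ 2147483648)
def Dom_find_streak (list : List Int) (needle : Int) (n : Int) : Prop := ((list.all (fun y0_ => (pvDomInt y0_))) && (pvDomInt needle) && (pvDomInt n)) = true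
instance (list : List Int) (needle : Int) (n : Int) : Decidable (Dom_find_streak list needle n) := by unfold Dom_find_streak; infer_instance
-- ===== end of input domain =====

-- B replaces A's streak-counter/flag loop by a sliding-window slice comparison; same results, alternative algorithm.

-- ===== PORT A =====
-- the while loop: state (count, streak), consuming the list element by element
def findStreakLoop (l : List Int) (needle : Int) (n : Int) (count : Int) (streak : Bool) : Bool :=
  match l with
  | [] => decide (n ≤ count) && streak
  | x :: xs =>
    if count < n then
      (if x = needle then findStreakLoop xs needle n (count + 1) true
       else findStreakLoop xs needle n 0 false)
    else decide (n ≤ count) && streak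

def find_streak (list : List Int) (needle : Int) (n : Int) : Bool :=
  if 0 ≤ n then findStreakLoop list needle n 0 false else false

-- ===== PORT B =====
-- prefix-count pass: prefFold builds the list `prefix` and the running `total` of Source B
def prefFold (needle : Int) (l : List Int) : List Int × Int :=
  l.foldl
    (fun (p : List Int × Int) x =>
      let t := p.2 + (if x = needle then 1 else 0)
      (p.1 ++ [t], t))
    ([0], 0)

def find_streak_alt (list : List Int) (needle : Int) (n : Int) : Bool :=
  if n ≤ 0 then false
  else
    -- prefix[i+n] / prefix[i]: both indices are in range for every i the range yields,
    -- so pyGetD's default is never consulted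
    (PySem.List.pyRange 0 ((list.length : Int) - n + 1) 1).any
      (fun i =>
        PySem.List.pyGetD (prefFold needle list).1 (i + n) 0
          - PySem.List.pyGetD (prefFold needle list).1 i 0 == n)

-- ===== PRECONDITION & SPEC =====
def Spec_find_streak (list : List Int) (needle : Int) (n : Int) (out : Bool) : Prop := out = find_streak_alt list needle n
instance (list : List Int) (needle : Int) (n : Int) (out : Bool) : Decidable (Spec_find_streak list needle n out) := by unfold Spec_find_streak; infer_instance

-- ===== CLAIM (what is proved, stated in full; the proofs are below) =====
def Claim_equal_find_streak : Prop := ∀ (list : List Int) (needle : Int) (n : Int), Dom_find_streak list needle n → Spec_find_streak list needle n (find_streak list needle n)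

-- ===== LEMMAS AND PROOFS =====

-- common middle form: does some suffix of l start with k consecutive needles?
def hasRunAt (needle : Int) (k : Nat) : List Int → Bool
  | [] => k == 0
  | x :: xs => decide (List.replicate k needle <+: x :: xs) || hasRunAt needle k xs

theorem replicate_prefix_mono (a : Int) {j k : Nat} (h : j ≤ k) :
    List.replicate j a <+: List.replicate k a := by
  refine ⟨List.replicate (k - j) a, ?_⟩
  rw [← List.replicate_add]
  congr 1
  omega

theorem hasRunAt_absorb (needle : Int) (k : Nat) (l : List Int) :
    (decide (List.replicate k needle <+: l) || hasRunAt needle k l) = hasRunAt needle k l := by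
  cases l with
  | nil => simp [hasRunAt, List.replicate_eq_nil_iff]
  | cons x xs => simp [hasRunAt]

theorem or_absorb_of_imp {p q h : Bool} (him : q = true → p = true) :
    (p || (q || h)) = (p || h) := by
  cases hp : p
  · cases hq : q
    · rfl
    · exact absurd (him hq) (by simp [hp])
  · rfl

theorem loop_char (needle n : Int) (hn : 0 < n) :
    ∀ (l : List Int) (c : Int) (s : Bool), 0 ≤ c → c < n →
      findStreakLoop l needle n c s
        = (decide (List.replicate (n - c).toNat needle <+: l) || hasRunAt needle n.toNat l) := by
  intro l
  induction l with
  | nil =>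
    intro c s hc0 hcn
    have h1 : (n - c).toNat = (n - c - 1).toNat + 1 := by omega
    have hns : ¬ (n ≤ c) := by omega
    have hn0 : n.toNat ≠ 0 := by omega
    unfold findStreakLoop hasRunAt
    rw [h1, List.replicate_succ]
    simp [hns, hn0]
  | cons x xs ih =>
    intro c s hc0 hcn
    have h1 : (n - c).toNat = (n - c - 1).toNat + 1 := by omega
    by_cases hx : x = needle
    · subst hx
      simp only [findStreakLoop, if_pos hcn, if_pos]
      by_cases hc1 : c + 1 < n
      · rw [ih (c + 1) true (by omega) hc1]
        have h2 : (n - (c + 1)).toNat = (n - c - 1).toNat := by omega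
        rw [h2, h1, List.replicate_succ, hasRunAt]
        have hpc : decide (x :: List.replicate (n - c - 1).toNat x <+: x :: xs)
            = decide (List.replicate (n - c - 1).toNat x <+: xs) := by
          simp [List.cons_prefix_cons]
        rw [hpc]
        refine (or_absorb_of_imp ?_).symm
        intro hq
        have hq' : List.replicate n.toNat x <+: x :: xs := by simpa using hq
        have h3 : n.toNat = (n - 1).toNat + 1 := by omega
        rw [h3, List.replicate_succ, List.cons_prefix_cons] at hq'
        have := (replicate_prefix_mono x (j := (n - c - 1).toNat)
          (k := (n - 1).toNat) (by omega)).trans hq'.2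
        simpa using this
      · have hceq : c + 1 = n := by omega
        rw [hceq]
        have : findStreakLoop xs x n n true = true := by
          cases xs <;> simp [findStreakLoop]
        rw [this]
        have hpre : List.replicate (n - c).toNat x <+: x :: xs := by
          have : (n - c).toNat = 1 := by omega
          simp [this, List.replicate_succ]
        simp [hpre]
    · simp only [findStreakLoop, if_pos hcn, if_neg hx]
      rw [ih 0 false le_rfl hn]
      have hnp0 : ¬ (List.replicate (n - c).toNat needle <+: x :: xs) := by
        rw [h1, List.replicate_succ]
        intro h
        exact hx (List.cons_prefix_cons.mp h).1.symm
      have hnp1 : ¬ (List.replicate n.toNat needle <+: x :: xs) := by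
        have h2 : n.toNat = (n - 1).toNat + 1 := by omega
        rw [h2, List.replicate_succ]
        intro h
        exact hx (List.cons_prefix_cons.mp h).1.symm
      have h3 : n.toNat = (n - 0).toNat := by omega
      rw [← h3, hasRunAt]
      simp [hnp0, hnp1, hasRunAt_absorb]

theorem hasRunAt_iff (needle : Int) (k : Nat) (l : List Int) :
    hasRunAt needle k l = true ↔ ∃ i : Nat, List.replicate k needle <+: l.drop i := by
  induction l with
  | nil =>
    simp [hasRunAt, List.prefix_nil, List.replicate_eq_nil_iff]
  | cons x xs ih =>
    simp only [hasRunAt, Bool.or_eq_true, decide_eq_true_eq, ih]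
    constructor
    · rintro (h | ⟨i, hi⟩)
      · exact ⟨0, h⟩
      · exact ⟨i + 1, hi⟩
    · rintro ⟨i, hi⟩
      cases i with
      | zero => exact Or.inl hi
      | succ j => exact Or.inr ⟨j, hi⟩

def cntN (needle : Int) (m : List Int) : Nat := m.countP (fun x => decide (x = needle))

theorem fold_prefix (needle : Int) (l : List Int) :
    ∀ (acc : List Int) (t : Int),
      (l.foldl
        (fun (p : List Int × Int) x =>
          let t' := p.2 + (if x = needle then 1 else 0)
          (p.1 ++ [t'], t'))
        (acc, t)).1
      = acc ++ (List.range l.length).map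
          (fun j => t + (cntN needle (l.take (j + 1)) : Int)) := by
  induction l with
  | nil => intro acc t; simp
  | cons x xs ih =>
    intro acc t
    simp only [List.foldl_cons]
    rw [ih]
    rw [List.append_assoc]
    congr 1
    rw [List.length_cons, List.range_succ_eq_map, List.map_cons, List.map_map]
    rw [List.singleton_append]
    congr 1
    · by_cases hx : x = needle <;> simp [cntN, hx]
    · refine List.map_congr_left ?_
      intro j _
      simp only [Function.comp_apply, Nat.succ_eq_add_one, List.take_succ_cons]
      by_cases hx : x = needle <;> simp [cntN, hx] <;> ring

theorem pref_getD (needle : Int) (l : List Int) (i : Int)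
    (h0 : 0 ≤ i) (h1 : i ≤ (l.length : Int)) :
    PySem.List.pyGetD (prefFold needle l).1 i 0 = (cntN needle (l.take i.toNat) : Int) := by
  have hpr : (prefFold needle l).1
      = (List.range (l.length + 1)).map (fun j => (cntN needle (l.take j) : Int)) := by
    rw [prefFold, fold_prefix]
    rw [List.range_succ_eq_map, List.map_cons, List.map_map]
    simp [cntN]
  rw [hpr]
  rw [PySem.List.pyGetD_eq_getElem _ _ h0 (by simp; omega)]
  simp only [List.getElem_map, List.getElem_range]

theorem alt_char (l : List Int) (needle n : Int) (hn : 0 < n) :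
    find_streak_alt l needle n = hasRunAt needle n.toNat l := by
  have hng : ¬ n ≤ 0 := by omega
  simp only [find_streak_alt, if_neg hng]
  rw [Bool.eq_iff_iff, List.any_eq_true, hasRunAt_iff]
  constructor
  · rintro ⟨i, hmem, hpred⟩
    obtain ⟨hi0, hiu⟩ := PySem.List.mem_pyRange_one.mp hmem
    have hin : i + n ≤ (l.length : Int) := by omega
    rw [pref_getD needle l (i + n) (by omega) hin,
        pref_getD needle l i hi0 (by omega)] at hpred
    have hsplit : (i + n).toNat = i.toNat + n.toNat := by omega
    rw [hsplit] at hpred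
    have hcnt : cntN needle (l.take (i.toNat + n.toNat))
        = cntN needle (l.take i.toNat) + cntN needle ((l.drop i.toNat).take n.toNat) := by
      unfold cntN
      rw [List.take_add, List.countP_append]
    rw [hcnt] at hpred
    rw [beq_iff_eq] at hpred
    have hwin : cntN needle ((l.drop i.toNat).take n.toNat) = n.toNat := by
      push_cast at hpred
      omega
    have hlenw : ((l.drop i.toNat).take n.toNat).length = n.toNat := by
      simp only [List.length_take, List.length_drop]
      omega
    have hall : ∀ b ∈ (l.drop i.toNat).take n.toNat, b = needle := by
      have h := List.countP_eq_length.mp (hwin.trans hlenw.symm)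
      intro b hb
      exact of_decide_eq_true (h b hb)
    refine ⟨i.toNat, ?_⟩
    rw [List.prefix_iff_eq_take, List.length_replicate]
    exact (List.eq_replicate_iff.mpr ⟨hlenw, hall⟩).symm
  · rintro ⟨j, hpre⟩
    have hlenj : n.toNat ≤ (l.drop j).length := hpre.length_le.trans_eq' (by simp)
    simp only [List.length_drop] at hlenj
    have hk0 : 0 < n.toNat := by omega
    refine ⟨(j : Int), PySem.List.mem_pyRange_one.mpr ⟨Int.natCast_nonneg j, by omega⟩, ?_⟩
    rw [pref_getD needle l ((j : Int) + n) (by omega) (by omega),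
        pref_getD needle l (j : Int) (Int.natCast_nonneg j) (by omega)]
    have hsplit : ((j : Int) + n).toNat = j + n.toNat := by omega
    rw [hsplit]
    have hcnt : cntN needle (l.take (j + n.toNat))
        = cntN needle (l.take j) + cntN needle ((l.drop j).take n.toNat) := by
      unfold cntN
      rw [List.take_add, List.countP_append]
    have hrepl : (l.drop j).take n.toNat = List.replicate n.toNat needle := by
      rw [List.prefix_iff_eq_take, List.length_replicate] at hpre
      exact hpre.symm
    have hc : cntN needle (List.replicate n.toNat needle) = n.toNat := by
      simp [cntN, List.countP_replicate]
    rw [beq_iff_eq]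
    simp only [Int.toNat_natCast] at hcnt ⊢
    rw [hcnt, hrepl, hc]
    omega

-- ===== VERDICT (by name: the statement is the Claim_ definition above) =====
theorem find_streak_spec : Claim_equal_find_streak := by
  intro l needle n _
  unfold Spec_find_streak
  rcases lt_trichotomy n 0 with hn | hn | hn
  · simp [find_streak, find_streak_alt, not_le.mpr hn, le_of_lt hn]
  · subst hn
    have hA : find_streak l needle 0 = false := by
      cases l <;> simp [find_streak, findStreakLoop]
    simp [hA, find_streak_alt]
  · have hA : find_streak l needle n = findStreakLoop l needle n 0 false := by
      simp [find_streak, le_of_lt hn]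
    rw [hA, loop_char needle n hn l 0 false le_rfl hn, alt_char l needle n hn]
    have h0 : (n - 0).toNat = n.toNat := by omega
    rw [h0, hasRunAt_absorb]
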